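-- pv_equiv track=rewrite | github.com/asiekierka/zzt-toolbox | mml2zzt.py | zzt_adjust_octave
-- ===== SOURCE A (Python) =====
-- def zzt_adjust_octave(state, note):
-- 	z_cmd = ""
-- 	if "octave" in note:
-- 		z_note_octave = note["octave"] - 1
-- 		if z_note_octave < 1:
-- 			z_note_octave = 1
-- 		if z_note_octave > 6:
-- 			z_note_octave = 6
-- 		while state["octave"] < z_note_octave:
-- 			z_cmd += "+"
-- 			state["octave"] += 1
-- 		while state["octave"] > z_note_octave:
-- 			z_cmd += "-"
-- 			state["octave"] -= 1
-- 	return z_cmd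
-- ===== SOURCE B (Python) =====
-- def zzt_adjust_octave(state, note):
--     if "octave" not in note:
--         return ""
--     target = min(6, max(1, note["octave"] - 1))
--     diff = target - state["octave"]
--     state["octave"] = target
--     return "+" * diff if diff > 0 else "-" * (-diff)
-- ===== Notes on version B (the rewrite author's own statement) =====
-- stated objective: simpler
-- what changed: Replaces the two increment/decrement while-loops by one arithmetic delta (clamped target minus current octave) and string multiplication, setting the state octave directly.
import Mathlib
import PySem

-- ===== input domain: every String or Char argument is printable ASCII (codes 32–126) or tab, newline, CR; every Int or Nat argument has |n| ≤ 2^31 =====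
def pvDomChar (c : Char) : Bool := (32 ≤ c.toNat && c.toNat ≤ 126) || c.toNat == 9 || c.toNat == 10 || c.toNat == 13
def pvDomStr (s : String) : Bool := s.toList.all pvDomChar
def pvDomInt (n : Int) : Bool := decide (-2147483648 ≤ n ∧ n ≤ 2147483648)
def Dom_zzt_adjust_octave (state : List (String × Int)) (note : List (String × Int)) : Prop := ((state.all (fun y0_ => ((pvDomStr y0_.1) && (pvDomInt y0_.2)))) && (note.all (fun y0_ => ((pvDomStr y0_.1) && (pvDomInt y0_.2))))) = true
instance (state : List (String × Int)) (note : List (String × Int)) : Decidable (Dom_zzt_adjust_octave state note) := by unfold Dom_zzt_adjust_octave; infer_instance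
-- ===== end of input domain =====

-- B replaces the two while-loops by one arithmetic delta and string multiplication (simpler).
-- Both Pythons mutate state["octave"] identically; the equivalence proved here is about the return value.

-- dict lookup (first match in insertion order); shared dict-access helper for both ports
def pvLookup (d : List (String × Int)) (k : String) : Option Int :=
  (d.find? (fun p => p.1 == k)).map Prod.snd

-- ===== PORT A =====
-- while state["octave"] < t: z_cmd += "+"; state["octave"] += 1
def zztUpLoop (z : String) (cur t : Int) : String × Int :=
  if cur < t then zztUpLoop (z ++ "+") (cur + 1) t else (z, cur)
termination_by (t - cur).toNat
decreasing_by omega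

-- while state["octave"] > t: z_cmd += "-"; state["octave"] -= 1
def zztDownLoop (z : String) (cur t : Int) : String × Int :=
  if cur > t then zztDownLoop (z ++ "-") (cur - 1) t else (z, cur)
termination_by (cur - t).toNat
decreasing_by omega

def zzt_adjust_octave (state : List (String × Int)) (note : List (String × Int)) : String :=
  match pvLookup note "octave" with
  | none => ""
  | some o =>
    let t0 := o - 1
    let t1 := if t0 < 1 then 1 else t0
    let t := if t1 > 6 then 6 else t1
    match pvLookup state "octave" with
    | none => ""           -- KeyError in Python; excluded by Pre_
    | some cur =>
      let (z, cur') := zztUpLoop "" cur t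
      (zztDownLoop z cur' t).1

-- ===== PORT B =====
def zzt_adjust_octave_alt (state : List (String × Int)) (note : List (String × Int)) : String :=
  match pvLookup note "octave" with
  | none => ""
  | some o =>
    let target := min 6 (max 1 (o - 1))
    match pvLookup state "octave" with
    | none => ""           -- KeyError in Python; excluded by Pre_
    | some cur =>
      let diff := target - cur
      if diff > 0 then String.ofList (List.replicate diff.toNat '+')
      else String.ofList (List.replicate (-diff).toNat '-')

-- ===== PRECONDITION & SPEC =====
-- Pre_ excludes only inputs where A raises KeyError: note has an "octave" key but state does not.
def Pre_zzt_adjust_octave (state : List (String × Int)) (note : List (String × Int)) : Prop :=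
  (pvLookup note "octave").isSome → (pvLookup state "octave").isSome
instance (state : List (String × Int)) (note : List (String × Int)) : Decidable (Pre_zzt_adjust_octave state note) := by unfold Pre_zzt_adjust_octave; infer_instance

def pvWitness_zzt_adjust_octave : (List (String × Int)) × (List (String × Int)) :=
  ([("octave", 2)], [("octave", 5)])

def Spec_zzt_adjust_octave (state : List (String × Int)) (note : List (String × Int)) (out : String) : Prop := out = zzt_adjust_octave_alt state note
instance (state : List (String × Int)) (note : List (String × Int)) (out : String) : Decidable (Spec_zzt_adjust_octave state note out) := by unfold Spec_zzt_adjust_octave; infer_instance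

-- ===== CLAIM (what is proved, stated in full; the proofs are below) =====
def Claim_equal_zzt_adjust_octave : Prop := ∀ (state : List (String × Int)) (note : List (String × Int)), Dom_zzt_adjust_octave state note → Pre_zzt_adjust_octave state note → Spec_zzt_adjust_octave state note (zzt_adjust_octave state note)

-- ===== LEMMAS AND PROOFS =====

theorem zztUpLoop_eq (n : Nat) : ∀ (z : String) (cur t : Int), (t - cur).toNat = n →
    zztUpLoop z cur t = (z ++ String.ofList (List.replicate n '+'), cur + n) := by
  induction n with
  | zero =>
    intro z cur t h
    rw [zztUpLoop]
    simp only [if_neg (by omega : ¬ cur < t)]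
    simp
  | succ k ih =>
    intro z cur t h
    rw [zztUpLoop]
    simp only [if_pos (by omega : cur < t)]
    rw [ih (z ++ "+") (cur + 1) t (by omega)]
    rw [Prod.mk.injEq]
    refine ⟨?_, by omega⟩
    apply String.ext
    simp [List.replicate_succ]

theorem zztDownLoop_eq (n : Nat) : ∀ (z : String) (cur t : Int), (cur - t).toNat = n →
    zztDownLoop z cur t = (z ++ String.ofList (List.replicate n '-'), cur - n) := by
  induction n with
  | zero =>
    intro z cur t h
    rw [zztDownLoop]
    simp only [if_neg (by omega : ¬ cur > t)]
    simp
  | succ k ih =>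
    intro z cur t h
    rw [zztDownLoop]
    simp only [if_pos (by omega : cur > t)]
    rw [ih (z ++ "-") (cur - 1) t (by omega)]
    rw [Prod.mk.injEq]
    refine ⟨?_, by omega⟩
    apply String.ext
    simp [List.replicate_succ]

-- ===== VERDICT (by name: the statement is the Claim_ definition above) =====
theorem zzt_adjust_octave_spec : Claim_equal_zzt_adjust_octave := by
  intro state note _ hpre
  unfold Spec_zzt_adjust_octave zzt_adjust_octave zzt_adjust_octave_alt
  cases hn : pvLookup note "octave" with
  | none => rfl
  | some o =>
    cases hs : pvLookup state "octave" with
    | none =>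
      exfalso
      have := hpre (by simp [hn])
      rw [hs] at this; simp at this
    | some cur =>
      simp only []
      set t1 := if o - 1 < 1 then 1 else o - 1 with ht1
      set t := if t1 > 6 then 6 else t1 with ht
      have htarget : min 6 (max 1 (o - 1)) = t := by
        simp only [ht, ht1]; omega
      rw [htarget]
      rw [zztUpLoop_eq (t - cur).toNat "" cur t rfl]
      simp only []
      rw [zztDownLoop_eq (cur + ((t - cur).toNat : Int) - t).toNat _ _ t rfl]
      simp only []
      by_cases hlt : t - cur > 0
      · rw [if_pos hlt]
        have h1 : (cur + ((t - cur).toNat : Int) - t).toNat = 0 := by omega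
        rw [h1]
        apply String.ext
        simp
      · rw [if_neg hlt]
        have h1 : (t - cur).toNat = 0 := by omega
        have h2 : (cur + ((t - cur).toNat : Int) - t).toNat = (-(t - cur)).toNat := by omega
        rw [h1] at h2 ⊢
        rw [h2]
        apply String.ext
        simp
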